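-- pv_equiv track=rewrite | github.com/fuJiin/arbora | experiments/scripts/cortex_staged.py | _extract_vocabulary
-- ===== SOURCE A (Python) =====
-- def _extract_vocabulary(tokens, min_count=3, min_length=2):
--     """Extract common words from corpus tokens for caregiver reward."""
--     from collections import Counter
--
--     words = Counter()
--     current = []
--     for token_id, ch in tokens:
--         if token_id < 0 or ch in (" ", ".", ",", "!", "?", "'", "-", ""):  # boundary
--             if len(current) >= min_length:
--                 words["".join(current)] += 1
--             current.clear()
--         else:
--             current.append(ch)
--     return {w for w, c in words.items() if c >= min_count}
-- ===== SOURCE B (Python) =====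
-- def _extract_vocabulary(tokens, min_count=3, min_length=2):
--     """Extract common words from corpus tokens for caregiver reward."""
--     from collections import Counter
--
--     boundary = (" ", ".", ",", "!", "?", "'", "-", "")
--     # phase 1: boundary positions split the stream into terminated token runs
--     segs = []
--     start = 0
--     for i, (token_id, ch) in enumerate(tokens):
--         if token_id < 0 or ch in boundary:
--             segs.append(tokens[start:i])
--             start = i + 1
--     # phase 2: count the sufficiently long terminated runs at once
--     counts = Counter("".join(ch for _, ch in seg)
--                      for seg in segs if len(seg) >= min_length)
--     return {w for w, c in counts.items() if c >= min_count}
-- ===== Notes on version B (the rewrite author's own statement) =====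
-- stated objective: alternative
-- what changed: A interleaves a mutable character accumulator with per-word Counter updates in one loop; B first segments the stream by boundary positions into token-run slices, then builds a single Counter over the sufficiently long terminated runs and filters it.
import Mathlib
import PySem

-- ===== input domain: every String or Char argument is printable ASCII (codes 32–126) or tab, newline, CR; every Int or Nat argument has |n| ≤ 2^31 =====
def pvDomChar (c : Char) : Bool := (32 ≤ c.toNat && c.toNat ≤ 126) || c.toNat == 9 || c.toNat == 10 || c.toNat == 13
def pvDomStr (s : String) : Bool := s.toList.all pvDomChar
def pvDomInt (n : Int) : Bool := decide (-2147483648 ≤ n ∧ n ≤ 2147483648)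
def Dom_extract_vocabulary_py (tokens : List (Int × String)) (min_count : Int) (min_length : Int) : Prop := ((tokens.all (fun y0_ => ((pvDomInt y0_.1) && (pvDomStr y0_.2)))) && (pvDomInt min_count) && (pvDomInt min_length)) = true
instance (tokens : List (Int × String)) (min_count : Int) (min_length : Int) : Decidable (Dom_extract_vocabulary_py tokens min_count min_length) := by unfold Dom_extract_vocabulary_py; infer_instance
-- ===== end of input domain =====

-- B replaces A's interleaved char-accumulator + per-word Counter updates by two phases
-- (boundary-index segmentation into slices, then one Counter over the terminated runs);
-- objective: alternative decomposition, same cost.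

-- boundary test shared by both Pythons: token_id < 0 or ch in (" ", ".", ",", "!", "?", "'", "-", "")
def isBoundaryTok (t : Int × String) : Bool :=
  t.1 < 0 || t.2 == " " || t.2 == "." || t.2 == "," || t.2 == "!" || t.2 == "?" ||
    t.2 == "'" || t.2 == "-" || t.2 == ""

-- ===== PORT A =====
def extract_vocabulary_py (tokens : List (Int × String)) (min_count : Int) (min_length : Int) : List String :=
  (((tokens.foldl
      (fun (st : PySem.Dict String Int × List String) t =>
        if isBoundaryTok t then
          (if (st.2.length : Int) ≥ min_length then
              st.1.modify (PySem.Str.join "" st.2) 0 (· + 1)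
            else st.1, [])
        else (st.1, st.2 ++ [t.2]))
      (PySem.Dict.empty, [])).1.items.filter (fun p => p.2 ≥ min_count)).map (·.1))

-- ===== PORT B =====
def segStep (tokens : List (Int × String)) (st : List (List (Int × String)) × Int)
    (it : Int × (Int × String)) : List (List (Int × String)) × Int :=
  if isBoundaryTok it.2 then
    (st.1 ++ [PySem.List.slice tokens (some st.2) (some it.1)], it.1 + 1)
  else st

def segsOf (tokens : List (Int × String)) : List (List (Int × String)) :=
  ((PySem.List.enumerate tokens 0).foldl (segStep tokens) ([], 0)).1

def extract_vocabulary_py_alt (tokens : List (Int × String)) (min_count : Int) (min_length : Int) : List String :=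
  ((PySem.Dict.counter
      (((segsOf tokens).filter (fun seg => (seg.length : Int) ≥ min_length)).map
        (fun seg => PySem.Str.join "" (seg.map (·.2))))).items.filter
    (fun p => p.2 ≥ min_count)).map (·.1)

-- ===== PRECONDITION & SPEC =====
def Spec_extract_vocabulary_py (tokens : List (Int × String)) (min_count : Int) (min_length : Int) (out : List String) : Prop := out = extract_vocabulary_py_alt tokens min_count min_length
instance (tokens : List (Int × String)) (min_count : Int) (min_length : Int) (out : List String) : Decidable (Spec_extract_vocabulary_py tokens min_count min_length out) := by unfold Spec_extract_vocabulary_py; infer_instance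

-- ===== CLAIM (what is proved, stated in full; the proofs are below) =====
def Claim_equal_extract_vocabulary_py : Prop := ∀ (tokens : List (Int × String)) (min_count : Int) (min_length : Int), Dom_extract_vocabulary_py tokens min_count min_length → Spec_extract_vocabulary_py tokens min_count min_length (extract_vocabulary_py tokens min_count min_length)

-- ===== LEMMAS AND PROOFS =====

-- the terminated runs of a token stream, as token lists (proof-side characterisation)
def segsRec (run : List (Int × String)) : List (Int × String) → List (List (Int × String))
  | [] => []
  | t :: ts => if isBoundaryTok t then run :: segsRec [] ts else segsRec (run ++ [t]) ts

-- the words A counts, in counting order (proof-side characterisation of A's loop)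
def flushA (min_length : Int) (cur : List String) : List (Int × String) → List String
  | [] => []
  | t :: ts =>
    if isBoundaryTok t then
      (if (cur.length : Int) ≥ min_length then [PySem.Str.join "" cur] else []) ++
        flushA min_length [] ts
    else flushA min_length (cur ++ [t.2]) ts

lemma loopA_eq (min_length : Int) :
    ∀ (ts : List (Int × String)) (d : PySem.Dict String Int) (cur : List String),
      (ts.foldl
        (fun (st : PySem.Dict String Int × List String) t =>
          if isBoundaryTok t then
            (if (st.2.length : Int) ≥ min_length then
                st.1.modify (PySem.Str.join "" st.2) 0 (· + 1)
              else st.1, [])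
          else (st.1, st.2 ++ [t.2])) (d, cur)).1
      = (flushA min_length cur ts).foldl (fun d w => d.modify w 0 (· + 1)) d := by
  intro ts
  induction ts with
  | nil => intro d cur; simp [flushA]
  | cons t ts ih =>
    intro d cur
    by_cases hb : isBoundaryTok t
    · by_cases hl : (cur.length : Int) ≥ min_length <;>
        simp [flushA, hb, hl, ih]
    · simp [flushA, hb, ih]

lemma segs_general :
    ∀ (ts pre run : List (Int × String)) (acc : List (List (Int × String))),
      ((PySem.List.enumerate ts ((pre.length + run.length : Nat) : Int)).foldl
        (segStep (pre ++ run ++ ts)) (acc, ((pre.length : Nat) : Int))).1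
      = acc ++ segsRec run ts := by
  intro ts
  induction ts with
  | nil => intro pre run acc; simp [segsRec, PySem.List.enumerate]
  | cons t ts ih =>
    intro pre run acc
    rw [PySem.List.enumerate_cons, List.foldl_cons]
    by_cases hb : isBoundaryTok t
    · have hstep : segStep (pre ++ run ++ t :: ts)
          (acc, ((pre.length : Nat) : Int)) (((pre.length + run.length : Nat) : Int), t)
          = (acc ++ [run], ((pre.length + run.length : Nat) : Int) + 1) := by
        unfold segStep
        rw [if_pos hb]
        congr 1
        rw [List.append_assoc, PySem.List.slice_natCast,
          List.drop_append_of_le_length (by omega)]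
        simp
      rw [hstep]
      have h2 := ih (pre ++ run ++ [t]) [] (acc ++ [run])
      have e1 : (((pre ++ run ++ [t]).length + ([] : List (Int × String)).length : Nat) : Int)
          = ((pre.length + run.length : Nat) : Int) + 1 := by simp; ring
      have e2 : (((pre ++ run ++ [t]).length : Nat) : Int)
          = ((pre.length + run.length : Nat) : Int) + 1 := by simp; ring
      have e3 : pre ++ run ++ [t] ++ [] ++ ts = pre ++ run ++ t :: ts := by simp
      rw [e1, e2, e3] at h2
      rw [h2, segsRec, if_pos hb, List.append_assoc, List.singleton_append]
    · have hstep : segStep (pre ++ run ++ t :: ts)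
          (acc, ((pre.length : Nat) : Int)) (((pre.length + run.length : Nat) : Int), t)
          = (acc, ((pre.length : Nat) : Int)) := by
        unfold segStep; rw [if_neg hb]
      rw [hstep]
      have h2 := ih pre (run ++ [t]) acc
      have e1 : ((pre.length + (run ++ [t]).length : Nat) : Int)
          = ((pre.length + run.length : Nat) : Int) + 1 := by simp; ring
      have e3 : pre ++ (run ++ [t]) ++ ts = pre ++ run ++ t :: ts := by simp
      rw [e1, e3] at h2
      rw [h2, segsRec, if_neg hb]

lemma segsOf_eq (tokens : List (Int × String)) : segsOf tokens = segsRec [] tokens := by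
  have h := segs_general tokens [] [] []
  simpa [segsOf] using h

lemma flushA_eq_segs (min_length : Int) :
    ∀ (ts run : List (Int × String)),
      flushA min_length (run.map (·.2)) ts
      = ((segsRec run ts).filter (fun s => (s.length : Int) ≥ min_length)).map
          (fun s => PySem.Str.join "" (s.map (·.2))) := by
  intro ts
  induction ts with
  | nil => intro run; simp [flushA, segsRec]
  | cons t ts ih =>
    intro run
    by_cases hb : isBoundaryTok t
    · have h := ih []
      simp only [List.map_nil] at h
      by_cases hl' : ((run.length : Int) ≥ min_length)
      · rw [segsRec, if_pos hb, List.filter_cons_of_pos (by simpa using hl'), List.map_cons]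
        simp only [flushA, hb, if_true, List.length_map, hl', List.singleton_append, h]
      · rw [segsRec, if_pos hb, List.filter_cons_of_neg (by simpa using hl')]
        simp only [flushA, hb, if_true, List.length_map, hl', if_false, List.nil_append, h]
    · have h := ih (run ++ [t])
      simp only [List.map_append, List.map_cons, List.map_nil] at h
      simp [flushA, segsRec, hb, h]

-- ===== VERDICT (by name: the statement is the Claim_ definition above) =====
theorem extract_vocabulary_py_spec : Claim_equal_extract_vocabulary_py := by
  intro tokens min_count min_length _
  show _ = _
  unfold extract_vocabulary_py extract_vocabulary_py_alt
  rw [loopA_eq, PySem.Dict.counter_eq_foldl, segsOf_eq]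
  rw [show flushA min_length ([] : List String) tokens
      = flushA min_length (([] : List (Int × String)).map (·.2)) tokens from rfl]
  rw [flushA_eq_segs]
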